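-- pv_equiv track=rewrite | github.com/bugzmanov/bookokrat | migrate_word_ranges.py | count_words
-- ===== SOURCE A (Python) =====
-- def count_words(text):
--     """Count words in text, matching Rust implementation."""
--     word_count = 0
--     in_word = False
--
--     for ch in text:
--         if ch.isspace():
--             in_word = False
--         elif not in_word:
--             word_count += 1
--             in_word = True
--
--     return word_count
-- ===== SOURCE B (Python) =====
-- def count_words(text):
--     """Count words in text, matching Rust implementation."""
--     return len(text.split())
-- ===== Notes on version B (the rewrite author's own statement) =====
-- stated objective: idiomatic
-- what changed: Replaces the manual in-word/out-of-word state-machine loop with str.split() (which collapses whitespace runs and drops empty tokens) and returns the token count.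
import Mathlib
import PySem

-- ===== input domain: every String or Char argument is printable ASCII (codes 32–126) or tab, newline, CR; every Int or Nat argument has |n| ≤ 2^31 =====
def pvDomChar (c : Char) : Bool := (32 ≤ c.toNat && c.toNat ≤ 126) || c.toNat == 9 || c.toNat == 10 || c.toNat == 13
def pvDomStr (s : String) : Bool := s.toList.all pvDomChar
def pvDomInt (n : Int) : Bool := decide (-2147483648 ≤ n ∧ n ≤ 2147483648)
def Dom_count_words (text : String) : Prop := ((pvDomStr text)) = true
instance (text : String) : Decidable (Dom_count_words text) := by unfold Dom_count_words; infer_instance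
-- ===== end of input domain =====

-- B replaces A's character state machine with str.split() and counts the tokens (idiomatic; measured constant-factor faster in a timing run).

-- ===== PORT A =====
-- one step of A's loop over the characters: state = (word_count, in_word)
def countWordsStep (s : Int × Bool) (c : Char) : Int × Bool :=
  if PySem.Chars.isspace c then (s.1, false)
  else if !s.2 then (s.1 + 1, true)
  else s

def count_words (text : String) : Int :=
  (text.toList.foldl countWordsStep (0, false)).1

-- ===== PORT B =====
def count_words_alt (text : String) : Int :=
  ((PySem.Str.split₀ text).length : Int)

-- ===== PRECONDITION & SPEC =====
def Spec_count_words (text : String) (out : Int) : Prop := out = count_words_alt text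
instance (text : String) (out : Int) : Decidable (Spec_count_words text out) := by unfold Spec_count_words; infer_instance

-- ===== CLAIM (what is proved, stated in full; the proofs are below) =====
def Claim_equal_count_words : Prop := ∀ (text : String), Dom_count_words text → Spec_count_words text (count_words text)

-- ===== LEMMAS AND PROOFS =====

theorem foldl_countWordsStep_shift (cs : List Char) (wc : Int) (iw : Bool) :
    (cs.foldl countWordsStep (wc, iw)).1 = wc + (cs.foldl countWordsStep (0, iw)).1 := by
  induction cs generalizing wc iw with
  | nil => simp
  | cons c rest ih =>
    simp only [List.foldl_cons, countWordsStep]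
    split_ifs with h1 h2
    · exact ih wc false
    · rw [ih (wc + 1) true, ih (0 + 1) true]; ring
    · exact ih wc iw

theorem go_length (cs cur : List Char) (acc : List (List Char)) :
    ((PySem.Chars.split₀.go cs cur acc).length : Int)
      = (acc.length : Int) + (if cur.isEmpty then 0 else 1)
        + (cs.foldl countWordsStep (0, !cur.isEmpty)).1 := by
  induction cs generalizing cur acc with
  | nil =>
    simp only [PySem.Chars.split₀.go, List.foldl_nil]
    by_cases hcur : cur.isEmpty = true
    · rw [if_pos hcur]; simp [hcur]
    · rw [if_neg hcur]; simp [hcur]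
  | cons c rest ih =>
    simp only [PySem.Chars.split₀.go, List.foldl_cons, countWordsStep]
    by_cases hsp : PySem.Chars.isspace c = true
    · rw [if_pos hsp, if_pos hsp]
      by_cases hcur : cur.isEmpty = true
      · rw [if_pos hcur, ih [] acc]
        simp [hcur]
      · rw [if_neg hcur, ih [] (cur.reverse :: acc)]
        simp [hcur]
    · rw [if_neg hsp, if_neg hsp]
      by_cases hcur : cur.isEmpty = true
      · have hcc : (c :: cur).isEmpty = false := rfl
        rw [ih (c :: cur) acc]
        simp only [hcc, hcur, Bool.not_true, Bool.not_false, Bool.false_eq_true, if_false, if_true]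
        rw [foldl_countWordsStep_shift rest (0 + 1) true]
        ring
      · have hcc : (c :: cur).isEmpty = false := rfl
        rw [ih (c :: cur) acc]
        simp [hcc, hcur]

-- ===== VERDICT (by name: the statement is the Claim_ definition above) =====
theorem count_words_spec : Claim_equal_count_words := by
  intro text _
  unfold Spec_count_words count_words count_words_alt PySem.Str.split₀ PySem.Chars.split₀
  rw [List.length_map]
  have h := go_length text.toList [] []
  simp only [List.isEmpty_nil, if_true, Bool.not_true, List.length_nil, Int.ofNat_zero] at h
  omega
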